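-- pv_equiv track=rewrite | github.com/THSSIR18/cis2300-e3 | e3.py | question5
-- ===== SOURCE A (Python) =====
-- MY_WORD = "FERRARI"
--
-- def question5(dict1):
--     keys = list(dict1.keys())
--     for i in range(len(keys)):
--         keys[i] = keys[i].lower()
--     values = list(dict1.values())
--     for i in range(len(values)):
--         values[i] = values[i].lower()
--     count = 0
--     word = MY_WORD.lower()
--     for i in keys:
--         for j in i:
--             if j in word:
--                 count += 1
--     for i in values:
--         for j in i:
--             if j in word:
--                 count += 1
--     return count
-- ===== SOURCE B (Python) =====
-- MY_WORD = "FERRARI"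
--
-- def question5(dict1):
--     counts = {}
--     for k in dict1.keys():
--         for ch in k.lower():
--             counts[ch] = counts.get(ch, 0) + 1
--     for v in dict1.values():
--         for ch in v.lower():
--             counts[ch] = counts.get(ch, 0) + 1
--     return sum(counts.get(ch, 0) for ch in set(MY_WORD.lower()))
-- ===== Notes on version B (the rewrite author's own statement) =====
-- stated objective: alternative
-- what changed: B builds one character histogram (dict) of the lowered keys and values and then sums the histogram entries for the distinct letters of MY_WORD, replacing A's per-character substring-membership test against the word.
import Mathlib
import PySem

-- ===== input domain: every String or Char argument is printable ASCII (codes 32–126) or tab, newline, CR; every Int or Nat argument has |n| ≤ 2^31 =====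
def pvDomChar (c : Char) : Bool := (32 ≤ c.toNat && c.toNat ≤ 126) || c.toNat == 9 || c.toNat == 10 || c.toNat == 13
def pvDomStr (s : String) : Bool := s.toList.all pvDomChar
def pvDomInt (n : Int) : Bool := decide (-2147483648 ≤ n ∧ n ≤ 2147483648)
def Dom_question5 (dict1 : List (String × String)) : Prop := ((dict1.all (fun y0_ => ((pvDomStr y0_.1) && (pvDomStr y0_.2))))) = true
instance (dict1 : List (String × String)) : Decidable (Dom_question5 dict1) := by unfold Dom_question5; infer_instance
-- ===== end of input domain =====

-- B replaces A's per-character membership scan against the word by a character histogram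
-- summed over the distinct letters of MY_WORD (objective: alternative).


-- ===== PORT A =====
def question5 (dict1 : List (String × String)) : Int :=
  let d := PySem.Dict.ofList dict1
  let keys := d.keys
  let keys := keys.map PySem.Str.lower          -- for i in range(len(keys)): keys[i] = keys[i].lower()
  let values := d.values
  let values := values.map PySem.Str.lower      -- for i in range(len(values)): values[i] = values[i].lower()
  let word := PySem.Str.lower "FERRARI"
  let count : Int := 0
  let count := keys.foldl (fun count i =>
    i.toList.foldl (fun count j =>
      if PySem.Chars.isIn [j] word.toList then count + 1 else count) count) count
  let count := values.foldl (fun count i =>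
    i.toList.foldl (fun count j =>
      if PySem.Chars.isIn [j] word.toList then count + 1 else count) count) count
  count

-- ===== PORT B =====
def question5_alt (dict1 : List (String × String)) : Int :=
  let d := PySem.Dict.ofList dict1
  let counts : PySem.Dict Char Int := d.keys.foldl (fun c k =>
    (PySem.Str.lower k).toList.foldl (fun c ch => c.insert ch (c.getD ch 0 + 1)) c) PySem.Dict.empty
  let counts := d.values.foldl (fun c v =>
    (PySem.Str.lower v).toList.foldl (fun c ch => c.insert ch (c.getD ch 0 + 1)) c) counts
  ((PySem.Set.ofList (PySem.Str.lower "FERRARI").toList).map (fun ch => counts.getD ch 0)).sum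

-- ===== PRECONDITION & SPEC =====
def Spec_question5 (dict1 : List (String × String)) (out : Int) : Prop := out = question5_alt dict1
instance (dict1 : List (String × String)) (out : Int) : Decidable (Spec_question5 dict1 out) := by unfold Spec_question5; infer_instance

-- ===== CLAIM (what is proved, stated in full; the proofs are below) =====
def Claim_equal_question5 : Prop := ∀ (dict1 : List (String × String)), Dom_question5 dict1 → Spec_question5 dict1 (question5 dict1)

-- ===== LEMMAS AND PROOFS =====

-- 'j in word' for a single character j is membership of j among word's characters
theorem isIn_singleton (j : Char) (wl : List Char) : PySem.Chars.isIn [j] wl = decide (j ∈ wl) := by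
  rcases h : PySem.Chars.isIn [j] wl with _ | _
  · rw [PySem.Chars.isIn_eq_false_iff] at h; simp [List.singleton_infix_iff] at h; simp [h]
  · rw [PySem.Chars.isIn_iff_infix] at h; simp [List.singleton_infix_iff] at h; simp [h]

-- summing the indicator of a over a duplicate-free list
theorem sum_ite_eq_indicator (S : List Char) (hS : S.Nodup) (a : Char) :
    (S.map (fun ch => if a = ch then (1 : Int) else 0)).sum = if a ∈ S then 1 else 0 := by
  induction S with
  | nil => simp
  | cons c S ih =>
    simp only [List.nodup_cons] at hS
    by_cases hac : a = c
    · subst hac; simp [hS.1, ih hS.2]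
    · simp [hac, ih hS.2]

-- counting characters that lie in S equals summing the per-character counts over S
theorem countP_mem_eq_sum_count (S : List Char) (hS : S.Nodup) (l : List Char) :
    ((l.countP (fun j => decide (j ∈ S)) : Nat) : Int) = (S.map (fun ch => (l.count ch : Int))).sum := by
  induction l with
  | nil => simp
  | cons a l ih =>
    have hsplit : ∀ ch ∈ S, ((a :: l).count ch : Int)
        = (l.count ch : Int) + (if a = ch then (1 : Int) else 0) := by
      intro ch _
      rw [List.count_cons]
      by_cases h : a = ch <;> simp [h]
    have hmap : (S.map (fun ch => ((a :: l).count ch : Int))).sum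
        = (S.map (fun ch => (l.count ch : Int))).sum
          + (S.map (fun ch => if a = ch then (1 : Int) else 0)).sum := by
      rw [← PySem.List.sum_map_add_int]
      exact congrArg List.sum (List.map_congr_left hsplit)
    rw [hmap, sum_ite_eq_indicator S hS a, ← ih, List.countP_cons]
    by_cases ha : a ∈ S
    · simp only [ha, decide_true, if_true]; push_cast; ring
    · simp [ha]

-- the per-string counts A accumulates, summed, are the countP of the concatenated text
theorem countP_flatMap_sum (p : Char → Bool) (f : String → List Char) (ss : List String) :
    (((ss.flatMap f).countP p : Nat) : Int) = (ss.map (fun s => (((f s).countP p : Nat) : Int))).sum := by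
  induction ss with
  | nil => simp
  | cons a ss ih =>
    simp only [List.flatMap_cons, List.countP_append, List.map_cons, List.sum_cons]
    push_cast
    rw [ih]

-- getD of B's nested histogram fold: initial count plus occurrences in the lowered strings
theorem getD_double_fold (ss : List String) (d : PySem.Dict Char Int) (ch : Char) :
    (ss.foldl (fun c k => (PySem.Str.lower k).toList.foldl
        (fun c x => c.insert x (c.getD x 0 + 1)) c) d).getD ch 0
      = d.getD ch 0 + ((ss.flatMap (fun k => (PySem.Str.lower k).toList)).count ch : Int) := by
  induction ss generalizing d with
  | nil => simp
  | cons a ss ih =>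
    simp only [List.foldl_cons, List.flatMap_cons, List.count_append]
    rw [ih, PySem.Dict.getD_foldl_insert_add_one]
    push_cast; ring

-- ===== VERDICT (by name: the statement is the Claim_ definition above) =====
theorem question5_spec : Claim_equal_question5 := by
  intro dict1 _
  unfold Spec_question5 question5 question5_alt
  simp only []
  set d := PySem.Dict.ofList dict1 with hd
  set wl := (PySem.Str.lower "FERRARI").toList with hwl
  set p : Char → Bool := fun j => decide (j ∈ wl) with hp
  -- A: each inner loop counts the characters of the string lying in wl
  have hinner : ∀ (l : List Char) (c : Int),
      l.foldl (fun count j => if PySem.Chars.isIn [j] wl then count + 1 else count) c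
        = c + ((l.countP p : Nat) : Int) := by
    intro l c
    rw [← PySem.List.foldl_if_add_one p l c]
    exact PySem.List.foldl_congr_mem l _ _ c (by intro acc x _; rw [hp, isIn_singleton])
  have houter : ∀ (ss : List String) (c : Int),
      (ss.map PySem.Str.lower).foldl (fun count i =>
        i.toList.foldl (fun count j =>
          if PySem.Chars.isIn [j] wl then count + 1 else count) count) c
        = c + (((ss.flatMap (fun k => (PySem.Str.lower k).toList)).countP p : Nat) : Int) := by
    intro ss c
    have h1 : (ss.map PySem.Str.lower).foldl (fun count i =>
        i.toList.foldl (fun count j =>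
          if PySem.Chars.isIn [j] wl then count + 1 else count) count) c
        = (ss.map PySem.Str.lower).foldl (fun count i => count + ((i.toList.countP p : Nat) : Int)) c :=
      PySem.List.foldl_congr_mem _ _ _ c (by intro acc x _; exact hinner x.toList acc)
    rw [h1, PySem.List.foldl_add, countP_flatMap_sum p (fun k => (PySem.Str.lower k).toList) ss,
        List.map_map]
    rfl
  rw [houter d.keys 0, houter d.values _]
  -- B: the histogram lookups are counts in the concatenated text
  set kf := d.keys.flatMap (fun k => (PySem.Str.lower k).toList) with hkf
  set vf := d.values.flatMap (fun k => (PySem.Str.lower k).toList) with hvf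
  have hB : ((PySem.Set.ofList wl).map (fun ch =>
      (d.values.foldl (fun c v => (PySem.Str.lower v).toList.foldl
          (fun c ch => c.insert ch (c.getD ch 0 + 1)) c)
        (d.keys.foldl (fun c k => (PySem.Str.lower k).toList.foldl
          (fun c ch => c.insert ch (c.getD ch 0 + 1)) c) PySem.Dict.empty)).getD ch 0)).sum
      = ((PySem.Set.ofList wl).map (fun ch => (((kf ++ vf).count ch : Nat) : Int))).sum := by
    apply congrArg List.sum
    apply List.map_congr_left
    intro ch _
    rw [getD_double_fold, getD_double_fold]
    simp only [PySem.Dict.getD_empty, List.count_append]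
    push_cast; ring
  rw [hB]
  -- bridge: countP over the text equals the sum of per-letter counts
  have hps : ∀ j, p j = decide (j ∈ PySem.Set.ofList wl) := by
    intro j; rw [hp]; simp [PySem.Set.mem_ofList]
  have hc : ∀ l : List Char, ((l.countP p : Nat) : Int)
      = ((PySem.Set.ofList wl).map (fun ch => ((l.count ch : Nat) : Int))).sum := by
    intro l
    rw [← countP_mem_eq_sum_count (PySem.Set.ofList wl) (PySem.Set.nodup_ofList wl) l]
    congr 1
    exact List.countP_congr (fun j _ => by rw [hps j])
  have hsplit : ((PySem.Set.ofList wl).map (fun ch => (((kf ++ vf).count ch : Nat) : Int))).sum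
      = ((PySem.Set.ofList wl).map (fun ch => ((kf.count ch : Nat) : Int))).sum
        + ((PySem.Set.ofList wl).map (fun ch => ((vf.count ch : Nat) : Int))).sum := by
    rw [← PySem.List.sum_map_add_int]
    apply congrArg List.sum
    apply List.map_congr_left
    intro ch _
    rw [List.count_append]
    push_cast; ring
  rw [hsplit, ← hc kf, ← hc vf]
  ring
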